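-- pv_equiv track=rewrite | github.com/h1s97x/Cryptogrphy | CryptographicProtocol/Diffie_Hellman_ui.py | convert_big
-- ===== SOURCE A (Python) =====
-- def convert_big(num):
--     num = list(num.replace(" ", ""))
--     list_len = len(num)
--     round_num = list_len // 8
--     remain = list_len % 8
--     new_num = []
--     i = round_num - 1
--     while i >= 0:
--         for j in range(0, 8):
--             new_num.append(num[remain + i * 8 + j])
--         i -= 1
--     for j in range(0, remain):
--         new_num.append(num[j])
--     fill_len = 256 - list_len
--     for i in range(0, fill_len):
--         new_num.append('0')
--     return "".join(new_num)
-- ===== SOURCE B (Python) =====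
-- def convert_big(num):
--     s = num.replace(" ", "")
--     r = len(s) % 8
--     body = s[r:]
--     chunks = [body[i:i + 8] for i in range(0, len(body), 8)]
--     return "".join(reversed(chunks)) + s[:r] + "0" * (256 - len(s))
-- ===== Notes on version B (the rewrite author's own statement) =====
-- stated objective: simpler
-- what changed: Replaces A's per-character index arithmetic (a while loop over block numbers with an inner 8-step for loop appending characters one by one) by slicing the string into whole 8-char blocks, reversing the block list and joining, with the remainder prefix and zero padding expressed as a slice and string multiplication.
import Mathlib
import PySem

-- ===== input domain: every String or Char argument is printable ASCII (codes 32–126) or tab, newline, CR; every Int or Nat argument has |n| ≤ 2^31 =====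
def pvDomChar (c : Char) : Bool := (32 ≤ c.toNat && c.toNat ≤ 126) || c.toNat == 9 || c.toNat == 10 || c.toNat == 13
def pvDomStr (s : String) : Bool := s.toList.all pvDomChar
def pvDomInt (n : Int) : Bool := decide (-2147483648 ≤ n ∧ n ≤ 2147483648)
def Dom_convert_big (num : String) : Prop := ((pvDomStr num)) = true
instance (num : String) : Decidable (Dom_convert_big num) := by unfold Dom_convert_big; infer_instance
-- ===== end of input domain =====

-- B reorders whole 8-char blocks via slicing, list reversal and join instead of A's
-- per-character index arithmetic in nested loops; objective: simpler.

-- ===== PORT A =====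
-- the 'while i >= 0' loop with its inner 'for j in range(0, 8)' append loop
def convertBigWhile (numL : List Char) (remain : Int) (i : Int) (acc : List Char) : List Char :=
  if _h : 0 ≤ i then
    convertBigWhile numL remain (i - 1)
      ((PySem.List.pyRange 0 8).foldl
        (fun a j => a ++ [PySem.List.pyGetD numL (remain + i * 8 + j) ' ']) acc)
  else acc
termination_by (i + 1).toNat
decreasing_by omega

def convert_big (num : String) : String :=
  let numL := (PySem.Str.replace num " " "").toList
  let list_len : Int := numL.length
  let round_num := PySem.Int.floordiv list_len 8
  let remain := PySem.Int.mod list_len 8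
  let new_num : List Char := []
  let new_num := convertBigWhile numL remain (round_num - 1) new_num
  let new_num := (PySem.List.pyRange 0 remain).foldl
      (fun a j => a ++ [PySem.List.pyGetD numL j ' ']) new_num
  let fill_len := 256 - list_len
  let new_num := (PySem.List.pyRange 0 fill_len).foldl (fun a _ => a ++ ['0']) new_num
  String.ofList new_num

-- ===== PORT B =====
def convert_big_alt (num : String) : String :=
  let s := (PySem.Str.replace num " " "").toList
  let r := PySem.Int.mod (s.length : Int) 8
  let body := PySem.List.slice s (some r) none
  let chunks := (PySem.List.pyRange 0 (body.length : Int) 8).map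
      (fun i => PySem.List.slice body (some i) (some (i + 8)))
  String.ofList (PySem.Chars.join [] chunks.reverse
      ++ PySem.List.slice s none (some r)
      ++ List.replicate (256 - (s.length : Int)).toNat '0')

-- ===== PRECONDITION & SPEC =====
def Spec_convert_big (num : String) (out : String) : Prop := out = convert_big_alt num
instance (num : String) (out : String) : Decidable (Spec_convert_big num out) := by unfold Spec_convert_big; infer_instance

-- ===== CLAIM (what is proved, stated in full; the proofs are below) =====
def Claim_equal_convert_big : Prop := ∀ (num : String), Dom_convert_big num → Spec_convert_big num (convert_big num)

-- ===== LEMMAS AND PROOFS =====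

lemma pv_mod8 (n : Nat) : PySem.Int.mod (n : Int) 8 = ((n % 8 : Nat) : Int) := by
  simp [PySem.Int.mod, Int.fmod_eq_emod]

lemma pv_div8 (n : Nat) : PySem.Int.floordiv (n : Int) 8 = ((n / 8 : Nat) : Int) := by
  simp [PySem.Int.floordiv, Int.fdiv_eq_ediv]

lemma pv_map_range_getD (s : List Char) (a m : Nat) (h : a + m ≤ s.length) :
    (List.range m).map (fun j => s.getD (a + j) ' ') = (s.drop a).take m := by
  apply List.ext_getElem
  · simp; omega
  · intro i h1 h2
    simp only [List.getElem_map, List.getElem_range, List.getElem_take, List.getElem_drop]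
    rw [List.getD_eq_getElem]

lemma pv_join_nil_flatten (xs : List (List Char)) :
    PySem.Chars.join [] xs = xs.flatten := by
  simp only [PySem.Chars.join, List.intercalate]
  induction xs with
  | nil => rfl
  | cons a t ih => cases t <;> simp_all [List.intersperse]

lemma pv_inner (s : List Char) (r k : Nat) (acc : List Char)
    (h : r + 8 * k + 8 ≤ s.length) :
    (PySem.List.pyRange 0 8).foldl
      (fun a j => a ++ [PySem.List.pyGetD s ((r : Int) + (k : Int) * 8 + j) ' ']) acc
    = acc ++ (s.drop (r + 8 * k)).take 8 := by
  rw [PySem.List.foldl_append_singleton_eq_map, PySem.List.pyRange_one]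
  rw [← pv_map_range_getD s (r + 8 * k) 8 h]
  simp only [List.map_map]
  apply congrArg
  apply List.map_congr_left
  intro j hj
  simp only [Function.comp]
  have : (r : Int) + (k : Int) * 8 + (0 + (j : Int)) = ((r + 8 * k + j : Nat) : Int) := by
    push_cast; ring
  rw [this, PySem.List.pyGetD_natCast]

lemma pv_while (s : List Char) (r : Nat) (hr : r = s.length % 8) :
    ∀ (k : Nat) (acc : List Char), r + 8 * k ≤ s.length →
    convertBigWhile s (r : Int) ((k : Int) - 1) acc
      = acc ++ (((List.range k).map (fun i => (s.drop (r + 8 * i)).take 8)).reverse).flatten := by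
  intro k
  induction k with
  | zero =>
    intro acc _
    rw [convertBigWhile]
    norm_num
  | succ k ih =>
    intro acc hk
    rw [convertBigWhile]
    have h0 : (0 : Int) ≤ ((k + 1 : Nat) : Int) - 1 := by push_cast; omega
    rw [dif_pos h0]
    have hI : ((k + 1 : Nat) : Int) - 1 = (k : Int) := by push_cast; ring
    have hcast : ((k + 1 : Nat) : Int) - 1 - 1 = ((k : Nat) : Int) - 1 := by push_cast; ring
    rw [hcast]
    have hb : r + 8 * k + 8 ≤ s.length := by omega
    have : (PySem.List.pyRange 0 8).foldl
        (fun a j => a ++ [PySem.List.pyGetD s ((r : Int) + (((k + 1 : Nat) : Int) - 1) * 8 + j) ' ']) acc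
        = acc ++ (s.drop (r + 8 * k)).take 8 := by
      rw [hI]; exact pv_inner s r k acc hb
    rw [this, ih _ (by omega)]
    rw [List.range_succ]
    simp [List.append_assoc]

lemma pv_remain_fold (s : List Char) (r : Nat) (acc : List Char) (h : r ≤ s.length) :
    (PySem.List.pyRange 0 (r : Int)).foldl
      (fun a j => a ++ [PySem.List.pyGetD s j ' ']) acc = acc ++ s.take r := by
  rw [PySem.List.foldl_append_singleton_eq_map, PySem.List.pyRange_one]
  have h0 : ((r : Int) - 0).toNat = r := by omega
  rw [h0]
  have := pv_map_range_getD s 0 r (by omega)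
  simp only [Nat.zero_add, List.drop_zero] at this
  rw [← this]
  simp only [List.map_map]
  apply congrArg
  apply List.map_congr_left
  intro j _
  simp only [Function.comp]
  rw [show (0 : Int) + (j : Int) = ((j : Nat) : Int) by ring, PySem.List.pyGetD_natCast]

lemma pv_fill_fold (m : Int) (acc : List Char) :
    (PySem.List.pyRange 0 m).foldl (fun a _ => a ++ ['0']) acc
      = acc ++ List.replicate m.toNat '0' := by
  rw [PySem.List.foldl_append_singleton_eq_map]
  apply congrArg
  rw [List.eq_replicate_iff]
  refine ⟨by simp [PySem.List.length_pyRange_one], ?_⟩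
  intro b hb
  simp only [List.mem_map] at hb
  obtain ⟨_, _, h⟩ := hb
  exact h.symm

lemma pv_chunks (s : List Char) (r q : Nat) (hr : r = s.length % 8) (hq : q = s.length / 8) :
    (PySem.List.pyRange 0 (((s.drop r).length : Nat) : Int) 8).map
        (fun i => PySem.List.slice (s.drop r) (some i) (some (i + 8)))
      = (List.range q).map (fun i => (s.drop (r + 8 * i)).take 8) := by
  have hlen : (s.drop r).length = 8 * q := by
    simp only [List.length_drop]; omega
  rw [hlen]
  rw [PySem.List.pyRange_of_pos 0 ((8 * q : Nat) : Int) (by norm_num)]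
  have hcount : (if (0 : Int) < ((8 * q : Nat) : Int)
      then ((((8 * q : Nat) : Int) - 0 + 8 - 1) / 8).toNat else 0) = q := by
    split_ifs with h
    · omega
    · omega
  rw [hcount]
  simp only [List.map_map]
  apply List.map_congr_left
  intro i _
  simp only [Function.comp]
  have hc : (0 : Int) + 8 * (i : Int) = ((8 * i : Nat) : Int) := by push_cast; ring
  rw [hc]
  rw [PySem.List.slice_toNat _ (by positivity) (by positivity)]
  have h1 : (((8 * i : Nat) : Int)).toNat = 8 * i := by omega
  have h2 : (((8 * i : Nat) : Int) + 8).toNat = 8 * i + 8 := by omega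
  rw [h1, h2, List.drop_drop]
  congr 1
  omega

lemma pv_main (s : List Char) :
    String.ofList
      ((PySem.List.pyRange 0 (256 - (s.length : Int))).foldl (fun a _ => a ++ ['0'])
        ((PySem.List.pyRange 0 (PySem.Int.mod (s.length : Int) 8)).foldl
          (fun a j => a ++ [PySem.List.pyGetD s j ' '])
          (convertBigWhile s (PySem.Int.mod (s.length : Int) 8)
            (PySem.Int.floordiv (s.length : Int) 8 - 1) [])))
    = String.ofList
      (PySem.Chars.join []
          ((PySem.List.pyRange 0 (((PySem.List.slice s (some (PySem.Int.mod (s.length : Int) 8)) none).length : Nat) : Int) 8).map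
            (fun i => PySem.List.slice (PySem.List.slice s (some (PySem.Int.mod (s.length : Int) 8)) none)
              (some i) (some (i + 8)))).reverse
        ++ PySem.List.slice s none (some (PySem.Int.mod (s.length : Int) 8))
        ++ List.replicate (256 - (s.length : Int)).toNat '0') := by
  set r : Nat := s.length % 8 with hr
  set q : Nat := s.length / 8 with hq
  have hmod : PySem.Int.mod (s.length : Int) 8 = (r : Int) := pv_mod8 s.length
  have hdiv : PySem.Int.floordiv (s.length : Int) 8 = (q : Int) := pv_div8 s.length
  rw [hmod, hdiv]
  have hslice_from : PySem.List.slice s (some (r : Int)) none = s.drop r := by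
    rw [PySem.List.slice_from s (by positivity)]; norm_num
  have hslice_to : PySem.List.slice s none (some (r : Int)) = s.take r := by
    rw [PySem.List.slice_to s (by positivity)]; norm_num
  rw [hslice_from, hslice_to]
  rw [pv_while s r hr q [] (by omega)]
  rw [pv_remain_fold s r _ (by omega)]
  rw [pv_fill_fold]
  rw [pv_chunks s r q hr hq, pv_join_nil_flatten]
  simp [List.append_assoc]

-- ===== VERDICT (by name: the statement is the Claim_ definition above) =====
theorem convert_big_spec : Claim_equal_convert_big := by
  intro num _
  unfold Spec_convert_big convert_big convert_big_alt
  exact pv_main ((PySem.Str.replace num " " "").toList)
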